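-- pv_equiv track=rewrite | github.com/huzeyann/ncut_pytorch | ncut_pytorch/predictor/dino/transform.py | compute_shift_directions
-- ===== SOURCE A (Python) =====
-- from typing import List, Literal, Tuple, Union, Optional
--
-- ShiftPattern = Literal["Neumann", "Moore", "Cross"]
--
-- def compute_shift_directions(
--     pattern: ShiftPattern
-- ) -> List[Tuple[int, int]]:
--     # Precompute neighbourhood shift unit vectors
--     shifts = [  # shifts in yx format
--         (-1, -1),
--         (-1, 0),
--         (-1, 1),
--         (0, -1),
--         (0, 0),
--         (0, 1),
--         (1, -1),
--         (1, 0),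
--         (1, 1),
--     ]
--     shift_directions: List[Tuple[int, int]] = []
--     for i in range(9):
--         if pattern == "Neumann" and i % 2 == 1:
--             shift_directions.append(shifts[i])
--         elif pattern == "Moore" and i != 4:
--             shift_directions.append(shifts[i])
--         elif pattern == "Cross" and i % 2 == 0:
--             shift_directions.append(shifts[i])
--     return shift_directions
-- ===== SOURCE B (Python) =====
-- _SHIFT_TABLE = {
--     "Neumann": [(-1, 0), (0, -1), (0, 1), (1, 0)],
--     "Moore": [(-1, -1), (-1, 0), (-1, 1), (0, -1), (0, 1), (1, -1), (1, 0), (1, 1)],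
--     "Cross": [(-1, -1), (-1, 1), (0, 0), (1, -1), (1, 1)],
-- }
--
-- def compute_shift_directions(pattern):
--     return list(_SHIFT_TABLE.get(pattern, []))
-- ===== Notes on version B (the rewrite author's own statement) =====
-- stated objective: simpler
-- what changed: Replaces the loop that filters a 9-element offset table by loop-counter parity with a single dictionary lookup of the precomputed direction list per pattern (closed form, no loop; unknown patterns get the [] default).
import Mathlib
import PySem

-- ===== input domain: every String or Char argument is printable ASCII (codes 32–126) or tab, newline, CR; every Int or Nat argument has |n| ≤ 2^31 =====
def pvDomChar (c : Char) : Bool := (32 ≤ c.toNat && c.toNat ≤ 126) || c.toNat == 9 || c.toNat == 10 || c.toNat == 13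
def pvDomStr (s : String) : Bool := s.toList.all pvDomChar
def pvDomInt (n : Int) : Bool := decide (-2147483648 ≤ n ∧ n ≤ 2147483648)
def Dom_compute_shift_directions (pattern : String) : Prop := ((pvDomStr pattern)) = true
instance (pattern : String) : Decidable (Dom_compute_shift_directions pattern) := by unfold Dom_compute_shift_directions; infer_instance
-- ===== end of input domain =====

-- B replaces A's loop filtering a 9-element offset table by loop-counter parity with a single
-- dictionary lookup of the per-pattern direction list (default []); objective: simpler.

-- ===== PORT A =====
def pvShiftsA : List (Int × Int) :=
  [(-1, -1), (-1, 0), (-1, 1), (0, -1), (0, 0), (0, 1), (1, -1), (1, 0), (1, 1)]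

def compute_shift_directions (pattern : String) : List (Int × Int) :=
  (PySem.List.pyRange 0 9 1).foldl (fun acc i =>
    if pattern == "Neumann" && PySem.Int.mod i 2 == 1 then
      acc ++ (PySem.List.pyGet? pvShiftsA i).toList
    else if pattern == "Moore" && i != 4 then
      acc ++ (PySem.List.pyGet? pvShiftsA i).toList
    else if pattern == "Cross" && PySem.Int.mod i 2 == 0 then
      acc ++ (PySem.List.pyGet? pvShiftsA i).toList
    else acc) []

-- ===== PORT B =====
def pvShiftTable : PySem.Dict String (List (Int × Int)) :=
  PySem.Dict.ofList
    [("Neumann", [(-1, 0), (0, -1), (0, 1), (1, 0)]),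
     ("Moore", [(-1, -1), (-1, 0), (-1, 1), (0, -1), (0, 1), (1, -1), (1, 0), (1, 1)]),
     ("Cross", [(-1, -1), (-1, 1), (0, 0), (1, -1), (1, 1)])]

def compute_shift_directions_alt (pattern : String) : List (Int × Int) :=
  PySem.Dict.getD pvShiftTable pattern []

-- ===== PRECONDITION & SPEC =====
def Spec_compute_shift_directions (pattern : String) (out : List (Int × Int)) : Prop := out = compute_shift_directions_alt pattern
instance (pattern : String) (out : List (Int × Int)) : Decidable (Spec_compute_shift_directions pattern out) := by unfold Spec_compute_shift_directions; infer_instance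

-- ===== CLAIM (what is proved, stated in full; the proofs are below) =====
def Claim_equal_compute_shift_directions : Prop := ∀ (pattern : String), Dom_compute_shift_directions pattern → Spec_compute_shift_directions pattern (compute_shift_directions pattern)

-- ===== LEMMAS AND PROOFS =====
theorem pv_other (pattern : String) (h1 : pattern ≠ "Neumann") (h2 : pattern ≠ "Moore")
    (h3 : pattern ≠ "Cross") :
    compute_shift_directions pattern = compute_shift_directions_alt pattern := by
  have htab : pvShiftTable.items =
      [("Neumann", [(-1, 0), (0, -1), (0, 1), (1, 0)]),
       ("Moore", [(-1, -1), (-1, 0), (-1, 1), (0, -1), (0, 1), (1, -1), (1, 0), (1, 1)]),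
       ("Cross", [(-1, -1), (-1, 1), (0, 0), (1, -1), (1, 1)])] := by decide
  have hb1 : ("Neumann" == pattern) = false := by simp [Ne.symm h1]
  have hb2 : ("Moore" == pattern) = false := by simp [Ne.symm h2]
  have hb3 : ("Cross" == pattern) = false := by simp [Ne.symm h3]
  simp [compute_shift_directions, compute_shift_directions_alt,
    PySem.Dict.getD, PySem.Dict.get?, htab, h1, h2, h3, hb1, hb2, hb3,
    PySem.List.pyRange_of_pos, List.find?]

-- ===== VERDICT (by name: the statement is the Claim_ definition above) =====
theorem compute_shift_directions_spec : Claim_equal_compute_shift_directions := by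
  intro pattern _
  unfold Spec_compute_shift_directions
  by_cases h1 : pattern = "Neumann"
  · subst h1; decide
  · by_cases h2 : pattern = "Moore"
    · subst h2; decide
    · by_cases h3 : pattern = "Cross"
      · subst h3; decide
      · exact pv_other pattern h1 h2 h3
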